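-- pv_equiv track=rewrite | github.com/tschenkster/ai-data-transformer | python-service/app/pandas_analyzer.py | _select_best_sheet
-- ===== SOURCE A (Python) =====
-- from typing import List, Dict, Any, Optional, Tuple
--
-- def _select_best_sheet(sheet_names: List[str]) -> str:
--     """Select the most likely sheet containing trial balance data"""
--     # Priority keywords for German accounting
--     priority_keywords = [
--         'summen', 'saldi', 'trial', 'balance', 'tb', 'guv', 'bwa',
--         'bilanz', 'konto', 'saldo', 'soll', 'haben'
--     ]
--
--     for keyword in priority_keywords:
--         for sheet in sheet_names:
--             if keyword.lower() in sheet.lower():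
--                 return sheet
--
--     # Return first sheet if no match
--     return sheet_names[0]
-- ===== SOURCE B (Python) =====
-- def _select_best_sheet(sheet_names):
--     """Select the most likely sheet containing trial balance data"""
--     priority_keywords = [
--         'summen', 'saldi', 'trial', 'balance', 'tb', 'guv', 'bwa',
--         'bilanz', 'konto', 'saldo', 'soll', 'haben'
--     ]
--     best = None
--     best_rank = len(priority_keywords)
--     for sheet in sheet_names:
--         low = sheet.lower()
--         for i, kw in enumerate(priority_keywords):
--             if kw.lower() in low:
--                 if i < best_rank:
--                     best, best_rank = sheet, i
--                 break
--     return best if best is not None else sheet_names[0]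
-- ===== Notes on version B (the rewrite author's own statement) =====
-- stated objective: alternative
-- what changed: A loops keywords outer and rescans all sheets for each keyword; B makes a single pass over the sheets, computing each sheet's best keyword rank and keeping the first sheet with the strictly smallest rank.
import Mathlib
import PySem

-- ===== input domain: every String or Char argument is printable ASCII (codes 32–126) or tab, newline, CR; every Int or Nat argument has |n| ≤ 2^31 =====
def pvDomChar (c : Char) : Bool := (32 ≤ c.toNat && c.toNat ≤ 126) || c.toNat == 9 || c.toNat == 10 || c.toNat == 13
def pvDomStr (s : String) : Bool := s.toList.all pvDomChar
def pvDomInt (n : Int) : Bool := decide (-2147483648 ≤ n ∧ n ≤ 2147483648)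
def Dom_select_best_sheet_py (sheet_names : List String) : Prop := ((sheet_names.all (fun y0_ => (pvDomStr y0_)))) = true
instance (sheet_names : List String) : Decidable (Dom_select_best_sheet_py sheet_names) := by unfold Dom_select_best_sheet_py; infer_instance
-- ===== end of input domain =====

-- B replaces A's keyword-outer rescan of all sheets with a single pass over the sheets
-- tracking the minimal keyword rank (alternative decomposition, same cost class).


-- same-module constant used by both versions
def pvPriorityKeywords : List String :=
  ["summen", "saldi", "trial", "balance", "tb", "guv", "bwa",
   "bilanz", "konto", "saldo", "soll", "haben"]

-- ===== PORT A =====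
-- 'for keyword: for sheet: if keyword.lower() in sheet.lower(): return sheet' as nested early-return search
def select_best_sheet_py (sheet_names : List String) : String :=
  match pvPriorityKeywords.findSome?
      (fun keyword => sheet_names.find?
        (fun sheet => PySem.Str.isIn (PySem.Str.lower keyword) (PySem.Str.lower sheet))) with
  | some sheet => sheet
  | none => (PySem.List.pyGet? sheet_names 0).getD ""   -- sheet_names[0]; empty list (IndexError) excluded by Pre_

-- ===== PORT B =====
-- 'for i, kw in enumerate(keywords): if kw.lower() in low: r = i; break' as indexed recursion
def pvRankFrom (i : Nat) (kws : List String) (low : String) : Option Nat :=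
  match kws with
  | [] => none
  | kw :: rest => if PySem.Str.isIn (PySem.Str.lower kw) low then some i else pvRankFrom (i + 1) rest low

-- one loop iteration of B: state = (best, best_rank)
def pvBestStep (st : Option String × Nat) (sheet : String) : Option String × Nat :=
  match pvRankFrom 0 pvPriorityKeywords (PySem.Str.lower sheet) with
  | some i => if i < st.2 then (some sheet, i) else st
  | none => st

def select_best_sheet_py_alt (sheet_names : List String) : String :=
  match (sheet_names.foldl pvBestStep (none, pvPriorityKeywords.length)).1 with
  | some sheet => sheet
  | none => (PySem.List.pyGet? sheet_names 0).getD ""   -- sheet_names[0]; empty list excluded by Pre_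

-- ===== PRECONDITION & SPEC =====
-- A raises IndexError on the empty list (sheet_names[0] when no keyword matches); excluded.
def Pre_select_best_sheet_py (sheet_names : List String) : Prop := sheet_names ≠ []
instance (sheet_names : List String) : Decidable (Pre_select_best_sheet_py sheet_names) := by unfold Pre_select_best_sheet_py; infer_instance
def pvWitness_select_best_sheet_py : List String := ["Sheet1"]

def Spec_select_best_sheet_py (sheet_names : List String) (out : String) : Prop := out = select_best_sheet_py_alt sheet_names
instance (sheet_names : List String) (out : String) : Decidable (Spec_select_best_sheet_py sheet_names out) := by unfold Spec_select_best_sheet_py; infer_instance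

-- ===== CLAIM (what is proved, stated in full; the proofs are below) =====
def Claim_equal_select_best_sheet_py : Prop := ∀ (sheet_names : List String), Dom_select_best_sheet_py sheet_names → Pre_select_best_sheet_py sheet_names → Spec_select_best_sheet_py sheet_names (select_best_sheet_py sheet_names)

-- ===== LEMMAS AND PROOFS =====

-- the matcher both versions use
def pvM (kw sheet : String) : Bool := PySem.Str.isIn (PySem.Str.lower kw) (PySem.Str.lower sheet)

-- B's step, generalized over the keyword list (pvBestStep = pvGStep pvPriorityKeywords)
def pvGStep (kws : List String) (st : Option String × Nat) (sheet : String) : Option String × Nat :=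
  match pvRankFrom 0 kws (PySem.Str.lower sheet) with
  | some i => if i < st.2 then (some sheet, i) else st
  | none => st

lemma pvGStep_eq : pvBestStep = pvGStep pvPriorityKeywords := rfl

lemma pvRankFrom_succ (kws : List String) (i : Nat) (low : String) :
    pvRankFrom (i + 1) kws low = (pvRankFrom i kws low).map (· + 1) := by
  induction kws generalizing i with
  | nil => rfl
  | cons kw rest ih =>
    simp only [pvRankFrom]
    split <;> simp [ih]

lemma pvRank_cons (kw : String) (rest : List String) (sheet : String) :
    pvRankFrom 0 (kw :: rest) (PySem.Str.lower sheet) =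
      if pvM kw sheet then some 0 else (pvRankFrom 0 rest (PySem.Str.lower sheet)).map (· + 1) := by
  simp only [pvRankFrom, pvM]
  split <;> simp [pvRankFrom_succ]

-- once best_rank = 0 the state is frozen
lemma pvFreeze (kws sheets : List String) (b : Option String) :
    sheets.foldl (pvGStep kws) (b, 0) = (b, 0) := by
  induction sheets with
  | nil => rfl
  | cons sh tl ih =>
    have : pvGStep kws (b, 0) sh = (b, 0) := by
      simp only [pvGStep]; split <;> simp_all
    simp [List.foldl, this, ih]

-- if some sheet matches the head keyword, the fold (from any state with rank ≥ 1) ends on the first such sheet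
lemma pvCaseSome (kw : String) (rest : List String) :
    ∀ (sheets : List String) (s₀ : String) (st : Option String × Nat), 1 ≤ st.2 →
      sheets.find? (fun sh => pvM kw sh) = some s₀ →
      (sheets.foldl (pvGStep (kw :: rest)) st).1 = some s₀ := by
  intro sheets
  induction sheets with
  | nil => intro s₀ st _ h; simp at h
  | cons sh tl ih =>
    intro s₀ st hst hfind
    by_cases h : pvM kw sh
    · have hs : s₀ = sh := by
        rw [List.find?_cons_of_pos h] at hfind; exact (Option.some.inj hfind).symm
      have hstep : pvGStep (kw :: rest) st sh = (some sh, 0) := by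
        simp only [pvGStep, pvRank_cons, h, if_pos]
        simp [Nat.lt_of_lt_of_le Nat.zero_lt_one hst]
      simp [List.foldl, hstep, pvFreeze, hs]
    · have hfind' : tl.find? (fun sh => pvM kw sh) = some s₀ := by
        rwa [List.find?_cons_of_neg (by simpa using h)] at hfind
      have : ∃ st' : Option String × Nat, pvGStep (kw :: rest) st sh = st' ∧ 1 ≤ st'.2 := by
        refine ⟨pvGStep (kw :: rest) st sh, rfl, ?_⟩
        simp only [pvGStep, pvRank_cons, h]
        cases hr : (pvRankFrom 0 rest (PySem.Str.lower sh)).map (· + 1) with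
        | none => simpa using hst
        | some j =>
          rcases Option.map_eq_some_iff.mp hr with ⟨j', _, rfl⟩
          by_cases hij : j' + 1 < st.2 <;> simp [hij, hst]
      rcases this with ⟨st', hstep, hst'⟩
      simp only [List.foldl, hstep]
      exact ih s₀ st' hst' hfind'
-- if no sheet matches the head keyword, the fold over kw::rest is the fold over rest with ranks shifted by one
lemma pvShift (kw : String) (rest : List String) :
    ∀ (sheets : List String) (b : Option String) (r : Nat),
      (∀ sh ∈ sheets, pvM kw sh = false) →
      sheets.foldl (pvGStep (kw :: rest)) (b, r + 1) =
        ((sheets.foldl (pvGStep rest) (b, r)).1, (sheets.foldl (pvGStep rest) (b, r)).2 + 1) := by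
  intro sheets
  induction sheets with
  | nil => intro b r _; rfl
  | cons sh tl ih =>
    intro b r hno
    have hm : pvM kw sh = false := hno sh (List.mem_cons_self ..)
    have hstep : pvGStep (kw :: rest) (b, r + 1) sh =
        ((pvGStep rest (b, r) sh).1, (pvGStep rest (b, r) sh).2 + 1) := by
      simp only [pvGStep, pvRank_cons, hm]
      cases hr : pvRankFrom 0 rest (PySem.Str.lower sh) with
      | none => simp
      | some j => by_cases hj : j < r <;> simp [hj]
    have htl : ∀ s ∈ tl, pvM kw s = false := fun s hs => hno s (List.mem_cons_of_mem _ hs)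
    simp only [List.foldl, hstep]
    exact ih (pvGStep rest (b, r) sh).1 (pvGStep rest (b, r) sh).2 htl

-- main correspondence: A's nested early-return search = first component of B's fold
lemma pvKey : ∀ (kws sheets : List String),
    kws.findSome? (fun kw => sheets.find? (fun sh => pvM kw sh)) =
      (sheets.foldl (pvGStep kws) (none, kws.length)).1 := by
  intro kws
  induction kws with
  | nil =>
    intro sheets
    have : sheets.foldl (pvGStep []) ((none : Option String), 0) = (none, 0) := by
      induction sheets with
      | nil => rfl
      | cons sh tl ih => simpa [List.foldl, pvGStep, pvRankFrom] using ih
    simp [this]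
  | cons kw rest ih =>
    intro sheets
    cases hfind : sheets.find? (fun sh => pvM kw sh) with
    | some s₀ =>
      rw [List.findSome?_cons]
      simp only [hfind]
      exact (pvCaseSome kw rest sheets s₀ (none, rest.length + 1) (Nat.le_add_left ..) hfind).symm
    | none =>
      have hno : ∀ sh ∈ sheets, pvM kw sh = false := by
        intro sh hsh
        simpa using List.find?_eq_none.mp hfind sh hsh
      rw [List.findSome?_cons]
      simp only [hfind, List.length_cons]
      rw [pvShift kw rest sheets none rest.length hno]
      exact ih sheets

-- ===== VERDICT (by name: the statement is the Claim_ definition above) =====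
theorem select_best_sheet_py_spec : Claim_equal_select_best_sheet_py := by
  intro sheet_names _ _
  unfold Spec_select_best_sheet_py select_best_sheet_py select_best_sheet_py_alt
  rw [pvGStep_eq, ← pvKey]
  rfl
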